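-- pv_equiv track=rewrite | github.com/frappe/frappe_docker | frappe-bench/env/lib/python2.7/site-packages/zxcvbn/scoring.py | calc_bruteforce_cardinality
-- ===== SOURCE A (Python) =====
-- def calc_bruteforce_cardinality(password):
--     lower, upper, digits, symbols = False, False, False, False
--     for char in password:
--         if char.islower():
--             lower = True
--         elif char.isdigit():
--             digits = True
--         elif char.isupper():
--             upper = True
--         else:
--             symbols = True
--     cardinality = 0
--     if digits:
--         cardinality += 10
--     if upper:
--         cardinality += 26
--     if lower:
--         cardinality += 26
--     if symbols:
--         cardinality += 33
--     return cardinality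
-- ===== SOURCE B (Python) =====
-- def calc_bruteforce_cardinality(password):
--     lower = any(c.islower() for c in password)
--     digits = any(c.isdigit() for c in password)
--     upper = any(c.isupper() for c in password)
--     symbols = any(not (c.islower() or c.isdigit() or c.isupper()) for c in password)
--     cardinality = 0
--     if digits:
--         cardinality += 10
--     if upper:
--         cardinality += 26
--     if lower:
--         cardinality += 26
--     if symbols:
--         cardinality += 33
--     return cardinality
-- ===== Notes on version B (the rewrite author's own statement) =====
-- stated objective: simpler
-- what changed: Replaces the single stateful classification loop with four independent any() scans, one per character class, so no mutable flag state or elif-chain is needed.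
import Mathlib
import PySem

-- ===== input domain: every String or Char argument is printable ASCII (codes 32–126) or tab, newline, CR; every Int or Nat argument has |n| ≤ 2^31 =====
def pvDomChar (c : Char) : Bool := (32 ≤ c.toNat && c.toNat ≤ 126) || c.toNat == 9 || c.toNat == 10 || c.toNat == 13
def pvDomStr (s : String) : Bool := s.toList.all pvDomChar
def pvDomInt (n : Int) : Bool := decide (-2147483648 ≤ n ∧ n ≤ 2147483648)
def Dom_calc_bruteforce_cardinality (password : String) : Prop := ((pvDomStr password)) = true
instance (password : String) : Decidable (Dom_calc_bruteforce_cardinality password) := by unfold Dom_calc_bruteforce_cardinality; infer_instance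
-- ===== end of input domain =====

-- B replaces A's single stateful classification loop by four independent any-scans (one per character class): simpler, no flag state.


-- ===== PORT A =====
-- A's for-loop over the characters, carrying the four flags (lower, upper, digits, symbols)
def pvLoopA : List Char → Bool × Bool × Bool × Bool → Bool × Bool × Bool × Bool
  | [], st => st
  | c :: rest, (l, u, d, s) =>
    if PySem.Chars.islower c then pvLoopA rest (true, u, d, s)
    else if PySem.Chars.isdigit c then pvLoopA rest (l, u, true, s)
    else if PySem.Chars.isupper c then pvLoopA rest (l, true, d, s)
    else pvLoopA rest (l, u, d, true)

def calc_bruteforce_cardinality (password : String) : Int :=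
  let st := pvLoopA password.toList (false, false, false, false)
  let lower := st.1; let upper := st.2.1; let digits := st.2.2.1; let symbols := st.2.2.2
  let c0 : Int := 0
  let c1 := if digits then c0 + 10 else c0
  let c2 := if upper then c1 + 26 else c1
  let c3 := if lower then c2 + 26 else c2
  if symbols then c3 + 33 else c3

-- ===== PORT B =====
def calc_bruteforce_cardinality_alt (password : String) : Int :=
  let cs := password.toList
  let lower := cs.any (fun c => PySem.Chars.islower c)
  let digits := cs.any (fun c => PySem.Chars.isdigit c)
  let upper := cs.any (fun c => PySem.Chars.isupper c)
  let symbols := cs.any (fun c => !(PySem.Chars.islower c || PySem.Chars.isdigit c || PySem.Chars.isupper c))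
  let c0 : Int := 0
  let c1 := if digits then c0 + 10 else c0
  let c2 := if upper then c1 + 26 else c1
  let c3 := if lower then c2 + 26 else c2
  if symbols then c3 + 33 else c3

-- ===== PRECONDITION & SPEC =====
def Spec_calc_bruteforce_cardinality (password : String) (out : Int) : Prop := out = calc_bruteforce_cardinality_alt password
instance (password : String) (out : Int) : Decidable (Spec_calc_bruteforce_cardinality password out) := by unfold Spec_calc_bruteforce_cardinality; infer_instance

-- ===== CLAIM (what is proved, stated in full; the proofs are below) =====
def Claim_equal_calc_bruteforce_cardinality : Prop := ∀ (password : String), Dom_calc_bruteforce_cardinality password → Spec_calc_bruteforce_cardinality password (calc_bruteforce_cardinality password)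

-- ===== LEMMAS AND PROOFS =====

theorem pv_charLe (a b : Char) : (a ≤ b) ↔ a.toNat ≤ b.toNat := Iff.rfl

theorem pv_consts : ('a':Char).toNat = 97 ∧ ('z':Char).toNat = 122 ∧ ('0':Char).toNat = 48 ∧ ('9':Char).toNat = 57 ∧ ('A':Char).toNat = 65 ∧ ('Z':Char).toNat = 90 := ⟨rfl, rfl, rfl, rfl, rfl, rfl⟩

-- the three character classes are pairwise disjoint (their code-point ranges do not overlap)
theorem pv_lower_not_digit (c : Char) (h : PySem.Chars.islower c = true) : PySem.Chars.isdigit c = false := by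
  simp only [PySem.Chars.islower, PySem.Chars.isdigit, Bool.and_eq_true, Bool.and_eq_false_iff, decide_eq_true_iff, decide_eq_false_iff_not, pv_charLe, pv_consts.1, pv_consts.2.1, pv_consts.2.2.1, pv_consts.2.2.2.1, not_le] at *
  omega

theorem pv_lower_not_upper (c : Char) (h : PySem.Chars.islower c = true) : PySem.Chars.isupper c = false := by
  simp only [PySem.Chars.islower, PySem.Chars.isupper, Bool.and_eq_true, Bool.and_eq_false_iff, decide_eq_true_iff, decide_eq_false_iff_not, pv_charLe, pv_consts.1, pv_consts.2.1, pv_consts.2.2.2.2.1, pv_consts.2.2.2.2.2, not_le] at *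
  omega

theorem pv_digit_not_upper (c : Char) (h : PySem.Chars.isdigit c = true) : PySem.Chars.isupper c = false := by
  simp only [PySem.Chars.isdigit, PySem.Chars.isupper, Bool.and_eq_true, Bool.and_eq_false_iff, decide_eq_true_iff, decide_eq_false_iff_not, pv_charLe, pv_consts.2.2.1, pv_consts.2.2.2.1, pv_consts.2.2.2.2.1, pv_consts.2.2.2.2.2, not_le] at *
  omega

-- loop invariant: A's flags after the loop are the initial flags OR-ed with B's any-scans
theorem pvLoopA_eq (cs : List Char) : ∀ (l u d s : Bool),
    pvLoopA cs (l, u, d, s) =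
      (l || cs.any (fun c => PySem.Chars.islower c),
       u || cs.any (fun c => PySem.Chars.isupper c),
       d || cs.any (fun c => PySem.Chars.isdigit c),
       s || cs.any (fun c => !(PySem.Chars.islower c || PySem.Chars.isdigit c || PySem.Chars.isupper c))) := by
  induction cs with
  | nil => intro l u d s; simp [pvLoopA]
  | cons c rest ih =>
    intro l u d s
    by_cases hl : PySem.Chars.islower c = true
    · simp [pvLoopA, hl, ih, pv_lower_not_digit c hl, pv_lower_not_upper c hl]
    · by_cases hd : PySem.Chars.isdigit c = true
      · simp [pvLoopA, hl, hd, ih, pv_digit_not_upper c hd]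
      · by_cases hu : PySem.Chars.isupper c = true
        · simp [pvLoopA, hl, hd, hu, ih]
        · simp [pvLoopA, hl, hd, hu, ih]

-- ===== VERDICT (by name: the statement is the Claim_ definition above) =====
theorem calc_bruteforce_cardinality_spec : Claim_equal_calc_bruteforce_cardinality := by
  intro password _
  unfold Spec_calc_bruteforce_cardinality calc_bruteforce_cardinality calc_bruteforce_cardinality_alt
  dsimp only
  rw [pvLoopA_eq]
  simp only [Bool.false_or]
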